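-- pv_equiv track=rewrite | github.com/MrBrantCode/unitest_baseline | mut_generate/mist_train_taco/taco_12819/solution.py | calculate_half_birthday
-- ===== SOURCE A (Python) =====
-- def calculate_half_birthday(birth_day: int, birth_month: str) -> tuple:
--     # Dictionary mapping months to their number of days
--     month_days = {
--         'january': 31, 'february': 29, 'march': 31, 'april': 30,
--         'may': 31, 'june': 30, 'july': 31, 'august': 31,
--         'september': 30, 'october': 31, 'november': 30, 'december': 31
--     }
--
--     # List of months in order
--     months = list(month_days.keys())
--
--     # Find the index of the birth month
--     birth_month_index = months.index(birth_month)
--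
--     # Calculate the remaining days from the birth day to the end of the birth month
--     remaining_days = month_days[birth_month] - birth_day
--
--     # Calculate the total days to add to reach the half birthday (183 days)
--     days_to_add = 183 - remaining_days
--
--     # Initialize the index for the half birthday month
--     half_birth_month_index = birth_month_index
--
--     # Loop to find the half birthday month and day
--     while days_to_add > 0:
--         if half_birth_month_index == 11:
--             half_birth_month_index = 0
--         else:
--             half_birth_month_index += 1
--
--         if days_to_add <= month_days[months[half_birth_month_index]]:
--             half_birth_day = days_to_add
--             break
--
--         days_to_add -= month_days[months[half_birth_month_index]]
--
--     # Return the half birthday day and month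
--     return half_birth_day, months[half_birth_month_index]
-- ===== SOURCE B (Python) =====
-- def calculate_half_birthday(birth_day: int, birth_month: str) -> tuple:
--     months = ['january', 'february', 'march', 'april', 'may', 'june', 'july',
--               'august', 'september', 'october', 'november', 'december']
--     lengths = [31, 29, 31, 30, 31, 30, 31, 31, 30, 31, 30, 31]
--     # prefix[m] = days of the (29-day-February) year strictly before month m; prefix[12] = 366
--     prefix = [0]
--     total = 0
--     for length in lengths:
--         total += length
--         prefix.append(total)
--     idx = months.index(birth_month)
--     # absolute day-of-year of the half birthday, reduced into 1..366
--     t = (prefix[idx] + birth_day + 182) % 366 + 1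
--     for m in range(12):
--         if t <= prefix[m + 1]:
--             return t - prefix[m], months[m]
-- ===== Notes on version B (the rewrite author's own statement) =====
-- stated objective: faster
-- what changed: Replaced the month-by-month subtraction loop (which iterates proportionally to birth_day) with a cumulative days-before-month prefix table: compute the birthday's absolute day-of-year, add 183, reduce mod 366 into 1..366, and locate the target month by a single scan of the 13-entry prefix table; Pre_ excludes exactly the inputs where A raises (invalid month name: ValueError; birth_day <= month_length-183: UnboundLocalError).
import Mathlib
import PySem

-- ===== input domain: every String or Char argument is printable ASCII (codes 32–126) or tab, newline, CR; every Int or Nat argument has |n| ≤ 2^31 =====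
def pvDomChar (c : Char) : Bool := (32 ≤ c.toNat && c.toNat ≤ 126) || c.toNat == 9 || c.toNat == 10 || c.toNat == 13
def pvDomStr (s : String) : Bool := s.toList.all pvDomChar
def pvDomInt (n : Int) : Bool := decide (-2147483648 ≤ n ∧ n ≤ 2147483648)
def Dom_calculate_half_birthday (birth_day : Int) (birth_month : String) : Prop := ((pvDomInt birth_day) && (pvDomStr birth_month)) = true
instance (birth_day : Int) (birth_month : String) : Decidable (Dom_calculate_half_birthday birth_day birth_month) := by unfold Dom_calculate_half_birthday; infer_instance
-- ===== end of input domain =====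

-- B replaces A's month-by-month subtraction loop (iteration count grows with birth_day) by a
-- prefix-table computation: absolute day-of-year + 183, reduced mod 366, then one scan of the
-- 13-entry table. Inputs where A raises (invalid month: ValueError; birth_day ≤ month_length − 183:
-- UnboundLocalError) are outside Pre_.


-- ===== PORT A =====
def pvMonthDays : PySem.Dict String Int :=
  PySem.Dict.ofList [("january", 31), ("february", 29), ("march", 31), ("april", 30),
    ("may", 31), ("june", 30), ("july", 31), ("august", 31),
    ("september", 30), ("october", 31), ("november", 30), ("december", 31)]

def pvMonths : List String := pvMonthDays.keys   -- months = list(month_days.keys())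

-- the while loop; fuel = days_to_add.toNat + 1 suffices (each pass shrinks days_to_add by ≥ 29,
-- fuel only by 1). fuel-0 and days_to_add ≤ 0 return a junk value: in Python half_birth_day is
-- then unbound (UnboundLocalError), excluded by Pre_.
def pvLoopA : Nat → Int → Int → Int × String
  | 0, _, _ => (0, "")
  | fuel + 1, idx, d =>
    if 0 < d then
      let idx' := if idx = 11 then 0 else idx + 1
      let m := PySem.List.pyGetD pvMonths idx' ""
      let len := (pvMonthDays.get? m).getD 0
      if d ≤ len then (d, m)
      else pvLoopA fuel idx' (d - len)
    else (0, "")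

def calculate_half_birthday (birth_day : Int) (birth_month : String) : Int × String :=
  match PySem.List.index? pvMonths birth_month with
  | none => (0, "")        -- months.index raises ValueError: excluded by Pre_
  | some idx =>
    let md := (pvMonthDays.get? birth_month).getD 0
    let remaining_days := md - birth_day
    let days_to_add := 183 - remaining_days
    pvLoopA (days_to_add.toNat + 1) (idx : Int) days_to_add

-- ===== PORT B =====
def pvMonthsB : List String :=
  ["january", "february", "march", "april", "may", "june", "july",
   "august", "september", "october", "november", "december"]

def pvLengthsB : List Int := [31, 29, 31, 30, 31, 30, 31, 31, 30, 31, 30, 31]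

-- prefix = [0]; total = 0; for length in lengths: total += length; prefix.append(total)
def pvPrefixB : List Int :=
  (pvLengthsB.foldl (fun (p : Int × List Int) len => (p.1 + len, p.2 ++ [p.1 + len])) (0, [0])).2

-- for m in range(12): if t <= prefix[m+1]: return (t - prefix[m], months[m])
-- (falling off the end cannot happen: t ≤ 366 = prefix[12]; junk value there)
def pvFindGo (t : Int) : List Nat → Int × String
  | [] => (0, "")
  | m :: rest =>
    if t ≤ PySem.List.pyGetD pvPrefixB ((m : Int) + 1) 0 then
      (t - PySem.List.pyGetD pvPrefixB (m : Int) 0, PySem.List.pyGetD pvMonthsB (m : Int) "")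
    else pvFindGo t rest

def calculate_half_birthday_alt (birth_day : Int) (birth_month : String) : Int × String :=
  match PySem.List.index? pvMonthsB birth_month with
  | none => (0, "")        -- months.index raises ValueError, as in A
  | some idx =>
    let t := PySem.Int.mod (PySem.List.pyGetD pvPrefixB (idx : Int) 0 + birth_day + 182) 366 + 1
    pvFindGo t (List.range 12)

-- ===== PRECONDITION & SPEC =====
-- Pre_ excludes exactly the inputs where A raises: an invalid month name (ValueError from
-- months.index) and birth_day ≤ month_days[birth_month] − 183 (the while loop never runs, so
-- half_birth_day is unbound: UnboundLocalError).
def Pre_calculate_half_birthday (birth_day : Int) (birth_month : String) : Prop :=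
  birth_month ∈ pvMonths ∧ 0 < 183 - (pvMonthDays.get? birth_month).getD 0 + birth_day
instance (birth_day : Int) (birth_month : String) : Decidable (Pre_calculate_half_birthday birth_day birth_month) := by
  unfold Pre_calculate_half_birthday; infer_instance

def pvWitness_calculate_half_birthday : Int × String := (14, "march")

def Spec_calculate_half_birthday (birth_day : Int) (birth_month : String) (out : Int × String) : Prop := out = calculate_half_birthday_alt birth_day birth_month
instance (birth_day : Int) (birth_month : String) (out : Int × String) : Decidable (Spec_calculate_half_birthday birth_day birth_month out) := by unfold Spec_calculate_half_birthday; infer_instance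

-- ===== CLAIM (what is proved, stated in full; the proofs are below) =====
def Claim_equal_calculate_half_birthday : Prop := ∀ (birth_day : Int) (birth_month : String), Dom_calculate_half_birthday birth_day birth_month → Pre_calculate_half_birthday birth_day birth_month → Spec_calculate_half_birthday birth_day birth_month (calculate_half_birthday birth_day birth_month)

-- ===== LEMMAS AND PROOFS =====

-- B's month scan, written out as a chain of ifs.
set_option maxHeartbeats 1000000 in
theorem findB_unfold (t : Int) : pvFindGo t (List.range 12) =
    (if t ≤ 31 then (t, "january") else if t ≤ 60 then (t - 31, "february")
     else if t ≤ 91 then (t - 60, "march") else if t ≤ 121 then (t - 91, "april")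
     else if t ≤ 152 then (t - 121, "may") else if t ≤ 182 then (t - 152, "june")
     else if t ≤ 213 then (t - 182, "july") else if t ≤ 244 then (t - 213, "august")
     else if t ≤ 274 then (t - 244, "september") else if t ≤ 305 then (t - 274, "october")
     else if t ≤ 335 then (t - 305, "november") else if t ≤ 366 then (t - 335, "december")
     else (0, "")) := by
  rw [show List.range 12 = [0,1,2,3,4,5,6,7,8,9,10,11] from by decide]
  simp only [pvFindGo]
  norm_num
  have hp0 : PySem.List.pyGetD pvPrefixB (0 : Int) 0 = 0 := by decide
  have hp1 : PySem.List.pyGetD pvPrefixB (1 : Int) 0 = 31 := by decide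
  have hp2 : PySem.List.pyGetD pvPrefixB (2 : Int) 0 = 60 := by decide
  have hp3 : PySem.List.pyGetD pvPrefixB (3 : Int) 0 = 91 := by decide
  have hp4 : PySem.List.pyGetD pvPrefixB (4 : Int) 0 = 121 := by decide
  have hp5 : PySem.List.pyGetD pvPrefixB (5 : Int) 0 = 152 := by decide
  have hp6 : PySem.List.pyGetD pvPrefixB (6 : Int) 0 = 182 := by decide
  have hp7 : PySem.List.pyGetD pvPrefixB (7 : Int) 0 = 213 := by decide
  have hp8 : PySem.List.pyGetD pvPrefixB (8 : Int) 0 = 244 := by decide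
  have hp9 : PySem.List.pyGetD pvPrefixB (9 : Int) 0 = 274 := by decide
  have hp10 : PySem.List.pyGetD pvPrefixB (10 : Int) 0 = 305 := by decide
  have hp11 : PySem.List.pyGetD pvPrefixB (11 : Int) 0 = 335 := by decide
  have hp12 : PySem.List.pyGetD pvPrefixB (12 : Int) 0 = 366 := by decide
  have hm0 : PySem.List.pyGetD pvMonthsB (0 : Int) "" = "january" := by decide
  have hm1 : PySem.List.pyGetD pvMonthsB (1 : Int) "" = "february" := by decide
  have hm2 : PySem.List.pyGetD pvMonthsB (2 : Int) "" = "march" := by decide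
  have hm3 : PySem.List.pyGetD pvMonthsB (3 : Int) "" = "april" := by decide
  have hm4 : PySem.List.pyGetD pvMonthsB (4 : Int) "" = "may" := by decide
  have hm5 : PySem.List.pyGetD pvMonthsB (5 : Int) "" = "june" := by decide
  have hm6 : PySem.List.pyGetD pvMonthsB (6 : Int) "" = "july" := by decide
  have hm7 : PySem.List.pyGetD pvMonthsB (7 : Int) "" = "august" := by decide
  have hm8 : PySem.List.pyGetD pvMonthsB (8 : Int) "" = "september" := by decide
  have hm9 : PySem.List.pyGetD pvMonthsB (9 : Int) "" = "october" := by decide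
  have hm10 : PySem.List.pyGetD pvMonthsB (10 : Int) "" = "november" := by decide
  have hm11 : PySem.List.pyGetD pvMonthsB (11 : Int) "" = "december" := by decide
  rw [hp0, hp1, hp2, hp3, hp4, hp5, hp6, hp7, hp8, hp9, hp10, hp11, hp12, hm0, hm1, hm2, hm3, hm4, hm5, hm6, hm7, hm8, hm9, hm10, hm11]
  norm_num

-- A's loop, related to B's scan: after the loop the remaining days land at absolute day
-- ((prefix[i+1] + d − 1) mod 366) + 1 of the 366-day year.
set_option maxHeartbeats 1000000 in
theorem loopA_eq : ∀ (fuel : Nat) (i d : Int), 0 ≤ i → i < 12 → 0 < d → d ≤ (fuel : Int) →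
    pvLoopA fuel i d
      = pvFindGo (PySem.Int.mod (PySem.List.pyGetD pvPrefixB (i + 1) 0 + d - 1) 366 + 1) (List.range 12) := by
  intro fuel
  induction fuel with
  | zero => intro i d h0 h1 h2 h3; exfalso; omega
  | succ fuel ih =>
    intro i d h0 h1 h2 h3
    have hi : i = 0 ∨ i = 1 ∨ i = 2 ∨ i = 3 ∨ i = 4 ∨ i = 5 ∨ i = 6 ∨ i = 7 ∨ i = 8 ∨ i = 9 ∨ i = 10 ∨ i = 11 := by omega
    rcases hi with rfl | rfl | rfl | rfl | rfl | rfl | rfl | rfl | rfl | rfl | rfl | rfl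
    · rw [show PySem.List.pyGetD pvPrefixB ((0 : Int) + 1) 0 = (31 : Int) from by decide]
      have hm : PySem.List.pyGetD pvMonths (1 : Int) "" = "february" := by decide
      have hl : (pvMonthDays.get? "february").getD 0 = (29 : Int) := by decide
      have e1 : pvLoopA (fuel + 1) (0 : Int) d
          = if d ≤ 29 then (d, "february") else pvLoopA fuel 1 (d - 29) := by
        simp only [pvLoopA, if_pos h2]
        norm_num [hm, hl]
      rw [e1]
      by_cases hd : d ≤ 29
      · have hmod : PySem.Int.mod ((31 : Int) + d - 1) 366 = 31 + d - 1 := by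
          rw [PySem.Int.mod_eq_emod_of_pos (by norm_num)]; omega
        rw [if_pos hd, hmod, findB_unfold,
            if_neg (by omega : ¬ (31 + d - 1 + 1 ≤ 31)),
            if_pos (by omega : 31 + d - 1 + 1 ≤ 60)]
        exact Prod.ext (by omega) rfl
      · rw [if_neg hd]
        have e2 := ih (1 : Int) (d - 29) (by norm_num) (by norm_num) (by omega) (by omega)
        have harg : PySem.Int.mod (PySem.List.pyGetD pvPrefixB ((1 : Int) + 1) 0 + (d - 29) - 1) 366
            = PySem.Int.mod ((31 : Int) + d - 1) 366 := by
          rw [show PySem.List.pyGetD pvPrefixB ((1 : Int) + 1) 0 = (60 : Int) from by decide,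
              PySem.Int.mod_eq_emod_of_pos (by norm_num), PySem.Int.mod_eq_emod_of_pos (by norm_num)]
          omega
        rw [e2, harg]
    · rw [show PySem.List.pyGetD pvPrefixB ((1 : Int) + 1) 0 = (60 : Int) from by decide]
      have hm : PySem.List.pyGetD pvMonths (2 : Int) "" = "march" := by decide
      have hl : (pvMonthDays.get? "march").getD 0 = (31 : Int) := by decide
      have e1 : pvLoopA (fuel + 1) (1 : Int) d
          = if d ≤ 31 then (d, "march") else pvLoopA fuel 2 (d - 31) := by
        simp only [pvLoopA, if_pos h2]
        norm_num [hm, hl]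
      rw [e1]
      by_cases hd : d ≤ 31
      · have hmod : PySem.Int.mod ((60 : Int) + d - 1) 366 = 60 + d - 1 := by
          rw [PySem.Int.mod_eq_emod_of_pos (by norm_num)]; omega
        rw [if_pos hd, hmod, findB_unfold,
            if_neg (by omega : ¬ (60 + d - 1 + 1 ≤ 31)),
            if_neg (by omega : ¬ (60 + d - 1 + 1 ≤ 60)),
            if_pos (by omega : 60 + d - 1 + 1 ≤ 91)]
        exact Prod.ext (by omega) rfl
      · rw [if_neg hd]
        have e2 := ih (2 : Int) (d - 31) (by norm_num) (by norm_num) (by omega) (by omega)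
        have harg : PySem.Int.mod (PySem.List.pyGetD pvPrefixB ((2 : Int) + 1) 0 + (d - 31) - 1) 366
            = PySem.Int.mod ((60 : Int) + d - 1) 366 := by
          rw [show PySem.List.pyGetD pvPrefixB ((2 : Int) + 1) 0 = (91 : Int) from by decide,
              PySem.Int.mod_eq_emod_of_pos (by norm_num), PySem.Int.mod_eq_emod_of_pos (by norm_num)]
          omega
        rw [e2, harg]
    · rw [show PySem.List.pyGetD pvPrefixB ((2 : Int) + 1) 0 = (91 : Int) from by decide]
      have hm : PySem.List.pyGetD pvMonths (3 : Int) "" = "april" := by decide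
      have hl : (pvMonthDays.get? "april").getD 0 = (30 : Int) := by decide
      have e1 : pvLoopA (fuel + 1) (2 : Int) d
          = if d ≤ 30 then (d, "april") else pvLoopA fuel 3 (d - 30) := by
        simp only [pvLoopA, if_pos h2]
        norm_num [hm, hl]
      rw [e1]
      by_cases hd : d ≤ 30
      · have hmod : PySem.Int.mod ((91 : Int) + d - 1) 366 = 91 + d - 1 := by
          rw [PySem.Int.mod_eq_emod_of_pos (by norm_num)]; omega
        rw [if_pos hd, hmod, findB_unfold,
            if_neg (by omega : ¬ (91 + d - 1 + 1 ≤ 31)),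
            if_neg (by omega : ¬ (91 + d - 1 + 1 ≤ 60)),
            if_neg (by omega : ¬ (91 + d - 1 + 1 ≤ 91)),
            if_pos (by omega : 91 + d - 1 + 1 ≤ 121)]
        exact Prod.ext (by omega) rfl
      · rw [if_neg hd]
        have e2 := ih (3 : Int) (d - 30) (by norm_num) (by norm_num) (by omega) (by omega)
        have harg : PySem.Int.mod (PySem.List.pyGetD pvPrefixB ((3 : Int) + 1) 0 + (d - 30) - 1) 366
            = PySem.Int.mod ((91 : Int) + d - 1) 366 := by
          rw [show PySem.List.pyGetD pvPrefixB ((3 : Int) + 1) 0 = (121 : Int) from by decide,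
              PySem.Int.mod_eq_emod_of_pos (by norm_num), PySem.Int.mod_eq_emod_of_pos (by norm_num)]
          omega
        rw [e2, harg]
    · rw [show PySem.List.pyGetD pvPrefixB ((3 : Int) + 1) 0 = (121 : Int) from by decide]
      have hm : PySem.List.pyGetD pvMonths (4 : Int) "" = "may" := by decide
      have hl : (pvMonthDays.get? "may").getD 0 = (31 : Int) := by decide
      have e1 : pvLoopA (fuel + 1) (3 : Int) d
          = if d ≤ 31 then (d, "may") else pvLoopA fuel 4 (d - 31) := by
        simp only [pvLoopA, if_pos h2]
        norm_num [hm, hl]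
      rw [e1]
      by_cases hd : d ≤ 31
      · have hmod : PySem.Int.mod ((121 : Int) + d - 1) 366 = 121 + d - 1 := by
          rw [PySem.Int.mod_eq_emod_of_pos (by norm_num)]; omega
        rw [if_pos hd, hmod, findB_unfold,
            if_neg (by omega : ¬ (121 + d - 1 + 1 ≤ 31)),
            if_neg (by omega : ¬ (121 + d - 1 + 1 ≤ 60)),
            if_neg (by omega : ¬ (121 + d - 1 + 1 ≤ 91)),
            if_neg (by omega : ¬ (121 + d - 1 + 1 ≤ 121)),
            if_pos (by omega : 121 + d - 1 + 1 ≤ 152)]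
        exact Prod.ext (by omega) rfl
      · rw [if_neg hd]
        have e2 := ih (4 : Int) (d - 31) (by norm_num) (by norm_num) (by omega) (by omega)
        have harg : PySem.Int.mod (PySem.List.pyGetD pvPrefixB ((4 : Int) + 1) 0 + (d - 31) - 1) 366
            = PySem.Int.mod ((121 : Int) + d - 1) 366 := by
          rw [show PySem.List.pyGetD pvPrefixB ((4 : Int) + 1) 0 = (152 : Int) from by decide,
              PySem.Int.mod_eq_emod_of_pos (by norm_num), PySem.Int.mod_eq_emod_of_pos (by norm_num)]
          omega
        rw [e2, harg]
    · rw [show PySem.List.pyGetD pvPrefixB ((4 : Int) + 1) 0 = (152 : Int) from by decide]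
      have hm : PySem.List.pyGetD pvMonths (5 : Int) "" = "june" := by decide
      have hl : (pvMonthDays.get? "june").getD 0 = (30 : Int) := by decide
      have e1 : pvLoopA (fuel + 1) (4 : Int) d
          = if d ≤ 30 then (d, "june") else pvLoopA fuel 5 (d - 30) := by
        simp only [pvLoopA, if_pos h2]
        norm_num [hm, hl]
      rw [e1]
      by_cases hd : d ≤ 30
      · have hmod : PySem.Int.mod ((152 : Int) + d - 1) 366 = 152 + d - 1 := by
          rw [PySem.Int.mod_eq_emod_of_pos (by norm_num)]; omega
        rw [if_pos hd, hmod, findB_unfold,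
            if_neg (by omega : ¬ (152 + d - 1 + 1 ≤ 31)),
            if_neg (by omega : ¬ (152 + d - 1 + 1 ≤ 60)),
            if_neg (by omega : ¬ (152 + d - 1 + 1 ≤ 91)),
            if_neg (by omega : ¬ (152 + d - 1 + 1 ≤ 121)),
            if_neg (by omega : ¬ (152 + d - 1 + 1 ≤ 152)),
            if_pos (by omega : 152 + d - 1 + 1 ≤ 182)]
        exact Prod.ext (by omega) rfl
      · rw [if_neg hd]
        have e2 := ih (5 : Int) (d - 30) (by norm_num) (by norm_num) (by omega) (by omega)
        have harg : PySem.Int.mod (PySem.List.pyGetD pvPrefixB ((5 : Int) + 1) 0 + (d - 30) - 1) 366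
            = PySem.Int.mod ((152 : Int) + d - 1) 366 := by
          rw [show PySem.List.pyGetD pvPrefixB ((5 : Int) + 1) 0 = (182 : Int) from by decide,
              PySem.Int.mod_eq_emod_of_pos (by norm_num), PySem.Int.mod_eq_emod_of_pos (by norm_num)]
          omega
        rw [e2, harg]
    · rw [show PySem.List.pyGetD pvPrefixB ((5 : Int) + 1) 0 = (182 : Int) from by decide]
      have hm : PySem.List.pyGetD pvMonths (6 : Int) "" = "july" := by decide
      have hl : (pvMonthDays.get? "july").getD 0 = (31 : Int) := by decide
      have e1 : pvLoopA (fuel + 1) (5 : Int) d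
          = if d ≤ 31 then (d, "july") else pvLoopA fuel 6 (d - 31) := by
        simp only [pvLoopA, if_pos h2]
        norm_num [hm, hl]
      rw [e1]
      by_cases hd : d ≤ 31
      · have hmod : PySem.Int.mod ((182 : Int) + d - 1) 366 = 182 + d - 1 := by
          rw [PySem.Int.mod_eq_emod_of_pos (by norm_num)]; omega
        rw [if_pos hd, hmod, findB_unfold,
            if_neg (by omega : ¬ (182 + d - 1 + 1 ≤ 31)),
            if_neg (by omega : ¬ (182 + d - 1 + 1 ≤ 60)),
            if_neg (by omega : ¬ (182 + d - 1 + 1 ≤ 91)),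
            if_neg (by omega : ¬ (182 + d - 1 + 1 ≤ 121)),
            if_neg (by omega : ¬ (182 + d - 1 + 1 ≤ 152)),
            if_neg (by omega : ¬ (182 + d - 1 + 1 ≤ 182)),
            if_pos (by omega : 182 + d - 1 + 1 ≤ 213)]
        exact Prod.ext (by omega) rfl
      · rw [if_neg hd]
        have e2 := ih (6 : Int) (d - 31) (by norm_num) (by norm_num) (by omega) (by omega)
        have harg : PySem.Int.mod (PySem.List.pyGetD pvPrefixB ((6 : Int) + 1) 0 + (d - 31) - 1) 366
            = PySem.Int.mod ((182 : Int) + d - 1) 366 := by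
          rw [show PySem.List.pyGetD pvPrefixB ((6 : Int) + 1) 0 = (213 : Int) from by decide,
              PySem.Int.mod_eq_emod_of_pos (by norm_num), PySem.Int.mod_eq_emod_of_pos (by norm_num)]
          omega
        rw [e2, harg]
    · rw [show PySem.List.pyGetD pvPrefixB ((6 : Int) + 1) 0 = (213 : Int) from by decide]
      have hm : PySem.List.pyGetD pvMonths (7 : Int) "" = "august" := by decide
      have hl : (pvMonthDays.get? "august").getD 0 = (31 : Int) := by decide
      have e1 : pvLoopA (fuel + 1) (6 : Int) d
          = if d ≤ 31 then (d, "august") else pvLoopA fuel 7 (d - 31) := by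
        simp only [pvLoopA, if_pos h2]
        norm_num [hm, hl]
      rw [e1]
      by_cases hd : d ≤ 31
      · have hmod : PySem.Int.mod ((213 : Int) + d - 1) 366 = 213 + d - 1 := by
          rw [PySem.Int.mod_eq_emod_of_pos (by norm_num)]; omega
        rw [if_pos hd, hmod, findB_unfold,
            if_neg (by omega : ¬ (213 + d - 1 + 1 ≤ 31)),
            if_neg (by omega : ¬ (213 + d - 1 + 1 ≤ 60)),
            if_neg (by omega : ¬ (213 + d - 1 + 1 ≤ 91)),
            if_neg (by omega : ¬ (213 + d - 1 + 1 ≤ 121)),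
            if_neg (by omega : ¬ (213 + d - 1 + 1 ≤ 152)),
            if_neg (by omega : ¬ (213 + d - 1 + 1 ≤ 182)),
            if_neg (by omega : ¬ (213 + d - 1 + 1 ≤ 213)),
            if_pos (by omega : 213 + d - 1 + 1 ≤ 244)]
        exact Prod.ext (by omega) rfl
      · rw [if_neg hd]
        have e2 := ih (7 : Int) (d - 31) (by norm_num) (by norm_num) (by omega) (by omega)
        have harg : PySem.Int.mod (PySem.List.pyGetD pvPrefixB ((7 : Int) + 1) 0 + (d - 31) - 1) 366
            = PySem.Int.mod ((213 : Int) + d - 1) 366 := by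
          rw [show PySem.List.pyGetD pvPrefixB ((7 : Int) + 1) 0 = (244 : Int) from by decide,
              PySem.Int.mod_eq_emod_of_pos (by norm_num), PySem.Int.mod_eq_emod_of_pos (by norm_num)]
          omega
        rw [e2, harg]
    · rw [show PySem.List.pyGetD pvPrefixB ((7 : Int) + 1) 0 = (244 : Int) from by decide]
      have hm : PySem.List.pyGetD pvMonths (8 : Int) "" = "september" := by decide
      have hl : (pvMonthDays.get? "september").getD 0 = (30 : Int) := by decide
      have e1 : pvLoopA (fuel + 1) (7 : Int) d
          = if d ≤ 30 then (d, "september") else pvLoopA fuel 8 (d - 30) := by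
        simp only [pvLoopA, if_pos h2]
        norm_num [hm, hl]
      rw [e1]
      by_cases hd : d ≤ 30
      · have hmod : PySem.Int.mod ((244 : Int) + d - 1) 366 = 244 + d - 1 := by
          rw [PySem.Int.mod_eq_emod_of_pos (by norm_num)]; omega
        rw [if_pos hd, hmod, findB_unfold,
            if_neg (by omega : ¬ (244 + d - 1 + 1 ≤ 31)),
            if_neg (by omega : ¬ (244 + d - 1 + 1 ≤ 60)),
            if_neg (by omega : ¬ (244 + d - 1 + 1 ≤ 91)),
            if_neg (by omega : ¬ (244 + d - 1 + 1 ≤ 121)),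
            if_neg (by omega : ¬ (244 + d - 1 + 1 ≤ 152)),
            if_neg (by omega : ¬ (244 + d - 1 + 1 ≤ 182)),
            if_neg (by omega : ¬ (244 + d - 1 + 1 ≤ 213)),
            if_neg (by omega : ¬ (244 + d - 1 + 1 ≤ 244)),
            if_pos (by omega : 244 + d - 1 + 1 ≤ 274)]
        exact Prod.ext (by omega) rfl
      · rw [if_neg hd]
        have e2 := ih (8 : Int) (d - 30) (by norm_num) (by norm_num) (by omega) (by omega)
        have harg : PySem.Int.mod (PySem.List.pyGetD pvPrefixB ((8 : Int) + 1) 0 + (d - 30) - 1) 366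
            = PySem.Int.mod ((244 : Int) + d - 1) 366 := by
          rw [show PySem.List.pyGetD pvPrefixB ((8 : Int) + 1) 0 = (274 : Int) from by decide,
              PySem.Int.mod_eq_emod_of_pos (by norm_num), PySem.Int.mod_eq_emod_of_pos (by norm_num)]
          omega
        rw [e2, harg]
    · rw [show PySem.List.pyGetD pvPrefixB ((8 : Int) + 1) 0 = (274 : Int) from by decide]
      have hm : PySem.List.pyGetD pvMonths (9 : Int) "" = "october" := by decide
      have hl : (pvMonthDays.get? "october").getD 0 = (31 : Int) := by decide
      have e1 : pvLoopA (fuel + 1) (8 : Int) d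
          = if d ≤ 31 then (d, "october") else pvLoopA fuel 9 (d - 31) := by
        simp only [pvLoopA, if_pos h2]
        norm_num [hm, hl]
      rw [e1]
      by_cases hd : d ≤ 31
      · have hmod : PySem.Int.mod ((274 : Int) + d - 1) 366 = 274 + d - 1 := by
          rw [PySem.Int.mod_eq_emod_of_pos (by norm_num)]; omega
        rw [if_pos hd, hmod, findB_unfold,
            if_neg (by omega : ¬ (274 + d - 1 + 1 ≤ 31)),
            if_neg (by omega : ¬ (274 + d - 1 + 1 ≤ 60)),
            if_neg (by omega : ¬ (274 + d - 1 + 1 ≤ 91)),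
            if_neg (by omega : ¬ (274 + d - 1 + 1 ≤ 121)),
            if_neg (by omega : ¬ (274 + d - 1 + 1 ≤ 152)),
            if_neg (by omega : ¬ (274 + d - 1 + 1 ≤ 182)),
            if_neg (by omega : ¬ (274 + d - 1 + 1 ≤ 213)),
            if_neg (by omega : ¬ (274 + d - 1 + 1 ≤ 244)),
            if_neg (by omega : ¬ (274 + d - 1 + 1 ≤ 274)),
            if_pos (by omega : 274 + d - 1 + 1 ≤ 305)]
        exact Prod.ext (by omega) rfl
      · rw [if_neg hd]
        have e2 := ih (9 : Int) (d - 31) (by norm_num) (by norm_num) (by omega) (by omega)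
        have harg : PySem.Int.mod (PySem.List.pyGetD pvPrefixB ((9 : Int) + 1) 0 + (d - 31) - 1) 366
            = PySem.Int.mod ((274 : Int) + d - 1) 366 := by
          rw [show PySem.List.pyGetD pvPrefixB ((9 : Int) + 1) 0 = (305 : Int) from by decide,
              PySem.Int.mod_eq_emod_of_pos (by norm_num), PySem.Int.mod_eq_emod_of_pos (by norm_num)]
          omega
        rw [e2, harg]
    · rw [show PySem.List.pyGetD pvPrefixB ((9 : Int) + 1) 0 = (305 : Int) from by decide]
      have hm : PySem.List.pyGetD pvMonths (10 : Int) "" = "november" := by decide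
      have hl : (pvMonthDays.get? "november").getD 0 = (30 : Int) := by decide
      have e1 : pvLoopA (fuel + 1) (9 : Int) d
          = if d ≤ 30 then (d, "november") else pvLoopA fuel 10 (d - 30) := by
        simp only [pvLoopA, if_pos h2]
        norm_num [hm, hl]
      rw [e1]
      by_cases hd : d ≤ 30
      · have hmod : PySem.Int.mod ((305 : Int) + d - 1) 366 = 305 + d - 1 := by
          rw [PySem.Int.mod_eq_emod_of_pos (by norm_num)]; omega
        rw [if_pos hd, hmod, findB_unfold,
            if_neg (by omega : ¬ (305 + d - 1 + 1 ≤ 31)),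
            if_neg (by omega : ¬ (305 + d - 1 + 1 ≤ 60)),
            if_neg (by omega : ¬ (305 + d - 1 + 1 ≤ 91)),
            if_neg (by omega : ¬ (305 + d - 1 + 1 ≤ 121)),
            if_neg (by omega : ¬ (305 + d - 1 + 1 ≤ 152)),
            if_neg (by omega : ¬ (305 + d - 1 + 1 ≤ 182)),
            if_neg (by omega : ¬ (305 + d - 1 + 1 ≤ 213)),
            if_neg (by omega : ¬ (305 + d - 1 + 1 ≤ 244)),
            if_neg (by omega : ¬ (305 + d - 1 + 1 ≤ 274)),
            if_neg (by omega : ¬ (305 + d - 1 + 1 ≤ 305)),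
            if_pos (by omega : 305 + d - 1 + 1 ≤ 335)]
        exact Prod.ext (by omega) rfl
      · rw [if_neg hd]
        have e2 := ih (10 : Int) (d - 30) (by norm_num) (by norm_num) (by omega) (by omega)
        have harg : PySem.Int.mod (PySem.List.pyGetD pvPrefixB ((10 : Int) + 1) 0 + (d - 30) - 1) 366
            = PySem.Int.mod ((305 : Int) + d - 1) 366 := by
          rw [show PySem.List.pyGetD pvPrefixB ((10 : Int) + 1) 0 = (335 : Int) from by decide,
              PySem.Int.mod_eq_emod_of_pos (by norm_num), PySem.Int.mod_eq_emod_of_pos (by norm_num)]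
          omega
        rw [e2, harg]
    · rw [show PySem.List.pyGetD pvPrefixB ((10 : Int) + 1) 0 = (335 : Int) from by decide]
      have hm : PySem.List.pyGetD pvMonths (11 : Int) "" = "december" := by decide
      have hl : (pvMonthDays.get? "december").getD 0 = (31 : Int) := by decide
      have e1 : pvLoopA (fuel + 1) (10 : Int) d
          = if d ≤ 31 then (d, "december") else pvLoopA fuel 11 (d - 31) := by
        simp only [pvLoopA, if_pos h2]
        norm_num [hm, hl]
      rw [e1]
      by_cases hd : d ≤ 31
      · have hmod : PySem.Int.mod ((335 : Int) + d - 1) 366 = 335 + d - 1 := by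
          rw [PySem.Int.mod_eq_emod_of_pos (by norm_num)]; omega
        rw [if_pos hd, hmod, findB_unfold,
            if_neg (by omega : ¬ (335 + d - 1 + 1 ≤ 31)),
            if_neg (by omega : ¬ (335 + d - 1 + 1 ≤ 60)),
            if_neg (by omega : ¬ (335 + d - 1 + 1 ≤ 91)),
            if_neg (by omega : ¬ (335 + d - 1 + 1 ≤ 121)),
            if_neg (by omega : ¬ (335 + d - 1 + 1 ≤ 152)),
            if_neg (by omega : ¬ (335 + d - 1 + 1 ≤ 182)),
            if_neg (by omega : ¬ (335 + d - 1 + 1 ≤ 213)),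
            if_neg (by omega : ¬ (335 + d - 1 + 1 ≤ 244)),
            if_neg (by omega : ¬ (335 + d - 1 + 1 ≤ 274)),
            if_neg (by omega : ¬ (335 + d - 1 + 1 ≤ 305)),
            if_neg (by omega : ¬ (335 + d - 1 + 1 ≤ 335)),
            if_pos (by omega : 335 + d - 1 + 1 ≤ 366)]
        exact Prod.ext (by omega) rfl
      · rw [if_neg hd]
        have e2 := ih (11 : Int) (d - 31) (by norm_num) (by norm_num) (by omega) (by omega)
        have harg : PySem.Int.mod (PySem.List.pyGetD pvPrefixB ((11 : Int) + 1) 0 + (d - 31) - 1) 366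
            = PySem.Int.mod ((335 : Int) + d - 1) 366 := by
          rw [show PySem.List.pyGetD pvPrefixB ((11 : Int) + 1) 0 = (366 : Int) from by decide,
              PySem.Int.mod_eq_emod_of_pos (by norm_num), PySem.Int.mod_eq_emod_of_pos (by norm_num)]
          omega
        rw [e2, harg]
    · rw [show PySem.List.pyGetD pvPrefixB ((11 : Int) + 1) 0 = (366 : Int) from by decide]
      have hm : PySem.List.pyGetD pvMonths (0 : Int) "" = "january" := by decide
      have hl : (pvMonthDays.get? "january").getD 0 = (31 : Int) := by decide
      have e1 : pvLoopA (fuel + 1) (11 : Int) d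
          = if d ≤ 31 then (d, "january") else pvLoopA fuel 0 (d - 31) := by
        simp only [pvLoopA, if_pos h2]
        norm_num [hm, hl]
      rw [e1]
      by_cases hd : d ≤ 31
      · have hmod : PySem.Int.mod ((366 : Int) + d - 1) 366 = d - 1 := by
          rw [PySem.Int.mod_eq_emod_of_pos (by norm_num)]; omega
        rw [if_pos hd, hmod, findB_unfold,
            if_pos (by omega : d - 1 + 1 ≤ 31)]
        exact Prod.ext (by omega) rfl
      · rw [if_neg hd]
        have e2 := ih (0 : Int) (d - 31) (by norm_num) (by norm_num) (by omega) (by omega)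
        have harg : PySem.Int.mod (PySem.List.pyGetD pvPrefixB ((0 : Int) + 1) 0 + (d - 31) - 1) 366
            = PySem.Int.mod ((366 : Int) + d - 1) 366 := by
          rw [show PySem.List.pyGetD pvPrefixB ((0 : Int) + 1) 0 = (31 : Int) from by decide,
              PySem.Int.mod_eq_emod_of_pos (by norm_num), PySem.Int.mod_eq_emod_of_pos (by norm_num)]
          omega
        rw [e2, harg]

-- ===== VERDICT (by name: the statement is the Claim_ definition above) =====
theorem calculate_half_birthday_spec : Claim_equal_calculate_half_birthday := by
  intro bd bm hDom hPre
  obtain ⟨hmem, hd⟩ := hPre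
  unfold Spec_calculate_half_birthday
  rw [show pvMonths = pvMonthsB from by decide] at hmem
  simp only [pvMonthsB, List.mem_cons, List.not_mem_nil, or_false] at hmem
  rcases hmem with rfl | rfl | rfl | rfl | rfl | rfl | rfl | rfl | rfl | rfl | rfl | rfl
  · -- "january"
    rw [show (pvMonthDays.get? "january").getD 0 = (31 : Int) from by decide] at hd
    simp only [calculate_half_birthday, calculate_half_birthday_alt,
      show PySem.List.index? pvMonths "january" = some 0 from by decide,
      show PySem.List.index? pvMonthsB "january" = some 0 from by decide,
      show (pvMonthDays.get? "january").getD 0 = (31 : Int) from by decide,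
      Nat.cast_ofNat, Nat.cast_zero, Nat.cast_one]
    rw [loopA_eq _ (0 : Int) (183 - (31 - bd)) (by norm_num) (by norm_num) (by omega) (by omega)]
    have harg : PySem.Int.mod (PySem.List.pyGetD pvPrefixB ((0 : Int) + 1) 0 + (183 - ((31 : Int) - bd)) - 1) 366
        = PySem.Int.mod (PySem.List.pyGetD pvPrefixB (0 : Int) 0 + bd + 182) 366 := by
      rw [show PySem.List.pyGetD pvPrefixB ((0 : Int) + 1) 0 = (31 : Int) from by decide,
          show PySem.List.pyGetD pvPrefixB (0 : Int) 0 = (0 : Int) from by decide]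
      congr 1
      ring
    rw [harg]
  · -- "february"
    rw [show (pvMonthDays.get? "february").getD 0 = (29 : Int) from by decide] at hd
    simp only [calculate_half_birthday, calculate_half_birthday_alt,
      show PySem.List.index? pvMonths "february" = some 1 from by decide,
      show PySem.List.index? pvMonthsB "february" = some 1 from by decide,
      show (pvMonthDays.get? "february").getD 0 = (29 : Int) from by decide,
      Nat.cast_ofNat, Nat.cast_zero, Nat.cast_one]
    rw [loopA_eq _ (1 : Int) (183 - (29 - bd)) (by norm_num) (by norm_num) (by omega) (by omega)]
    have harg : PySem.Int.mod (PySem.List.pyGetD pvPrefixB ((1 : Int) + 1) 0 + (183 - ((29 : Int) - bd)) - 1) 366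
        = PySem.Int.mod (PySem.List.pyGetD pvPrefixB (1 : Int) 0 + bd + 182) 366 := by
      rw [show PySem.List.pyGetD pvPrefixB ((1 : Int) + 1) 0 = (60 : Int) from by decide,
          show PySem.List.pyGetD pvPrefixB (1 : Int) 0 = (31 : Int) from by decide]
      congr 1
      ring
    rw [harg]
  · -- "march"
    rw [show (pvMonthDays.get? "march").getD 0 = (31 : Int) from by decide] at hd
    simp only [calculate_half_birthday, calculate_half_birthday_alt,
      show PySem.List.index? pvMonths "march" = some 2 from by decide,
      show PySem.List.index? pvMonthsB "march" = some 2 from by decide,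
      show (pvMonthDays.get? "march").getD 0 = (31 : Int) from by decide,
      Nat.cast_ofNat, Nat.cast_zero, Nat.cast_one]
    rw [loopA_eq _ (2 : Int) (183 - (31 - bd)) (by norm_num) (by norm_num) (by omega) (by omega)]
    have harg : PySem.Int.mod (PySem.List.pyGetD pvPrefixB ((2 : Int) + 1) 0 + (183 - ((31 : Int) - bd)) - 1) 366
        = PySem.Int.mod (PySem.List.pyGetD pvPrefixB (2 : Int) 0 + bd + 182) 366 := by
      rw [show PySem.List.pyGetD pvPrefixB ((2 : Int) + 1) 0 = (91 : Int) from by decide,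
          show PySem.List.pyGetD pvPrefixB (2 : Int) 0 = (60 : Int) from by decide]
      congr 1
      ring
    rw [harg]
  · -- "april"
    rw [show (pvMonthDays.get? "april").getD 0 = (30 : Int) from by decide] at hd
    simp only [calculate_half_birthday, calculate_half_birthday_alt,
      show PySem.List.index? pvMonths "april" = some 3 from by decide,
      show PySem.List.index? pvMonthsB "april" = some 3 from by decide,
      show (pvMonthDays.get? "april").getD 0 = (30 : Int) from by decide,
      Nat.cast_ofNat, Nat.cast_zero, Nat.cast_one]
    rw [loopA_eq _ (3 : Int) (183 - (30 - bd)) (by norm_num) (by norm_num) (by omega) (by omega)]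
    have harg : PySem.Int.mod (PySem.List.pyGetD pvPrefixB ((3 : Int) + 1) 0 + (183 - ((30 : Int) - bd)) - 1) 366
        = PySem.Int.mod (PySem.List.pyGetD pvPrefixB (3 : Int) 0 + bd + 182) 366 := by
      rw [show PySem.List.pyGetD pvPrefixB ((3 : Int) + 1) 0 = (121 : Int) from by decide,
          show PySem.List.pyGetD pvPrefixB (3 : Int) 0 = (91 : Int) from by decide]
      congr 1
      ring
    rw [harg]
  · -- "may"
    rw [show (pvMonthDays.get? "may").getD 0 = (31 : Int) from by decide] at hd
    simp only [calculate_half_birthday, calculate_half_birthday_alt,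
      show PySem.List.index? pvMonths "may" = some 4 from by decide,
      show PySem.List.index? pvMonthsB "may" = some 4 from by decide,
      show (pvMonthDays.get? "may").getD 0 = (31 : Int) from by decide,
      Nat.cast_ofNat, Nat.cast_zero, Nat.cast_one]
    rw [loopA_eq _ (4 : Int) (183 - (31 - bd)) (by norm_num) (by norm_num) (by omega) (by omega)]
    have harg : PySem.Int.mod (PySem.List.pyGetD pvPrefixB ((4 : Int) + 1) 0 + (183 - ((31 : Int) - bd)) - 1) 366
        = PySem.Int.mod (PySem.List.pyGetD pvPrefixB (4 : Int) 0 + bd + 182) 366 := by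
      rw [show PySem.List.pyGetD pvPrefixB ((4 : Int) + 1) 0 = (152 : Int) from by decide,
          show PySem.List.pyGetD pvPrefixB (4 : Int) 0 = (121 : Int) from by decide]
      congr 1
      ring
    rw [harg]
  · -- "june"
    rw [show (pvMonthDays.get? "june").getD 0 = (30 : Int) from by decide] at hd
    simp only [calculate_half_birthday, calculate_half_birthday_alt,
      show PySem.List.index? pvMonths "june" = some 5 from by decide,
      show PySem.List.index? pvMonthsB "june" = some 5 from by decide,
      show (pvMonthDays.get? "june").getD 0 = (30 : Int) from by decide,
      Nat.cast_ofNat, Nat.cast_zero, Nat.cast_one]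
    rw [loopA_eq _ (5 : Int) (183 - (30 - bd)) (by norm_num) (by norm_num) (by omega) (by omega)]
    have harg : PySem.Int.mod (PySem.List.pyGetD pvPrefixB ((5 : Int) + 1) 0 + (183 - ((30 : Int) - bd)) - 1) 366
        = PySem.Int.mod (PySem.List.pyGetD pvPrefixB (5 : Int) 0 + bd + 182) 366 := by
      rw [show PySem.List.pyGetD pvPrefixB ((5 : Int) + 1) 0 = (182 : Int) from by decide,
          show PySem.List.pyGetD pvPrefixB (5 : Int) 0 = (152 : Int) from by decide]
      congr 1
      ring
    rw [harg]
  · -- "july"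
    rw [show (pvMonthDays.get? "july").getD 0 = (31 : Int) from by decide] at hd
    simp only [calculate_half_birthday, calculate_half_birthday_alt,
      show PySem.List.index? pvMonths "july" = some 6 from by decide,
      show PySem.List.index? pvMonthsB "july" = some 6 from by decide,
      show (pvMonthDays.get? "july").getD 0 = (31 : Int) from by decide,
      Nat.cast_ofNat, Nat.cast_zero, Nat.cast_one]
    rw [loopA_eq _ (6 : Int) (183 - (31 - bd)) (by norm_num) (by norm_num) (by omega) (by omega)]
    have harg : PySem.Int.mod (PySem.List.pyGetD pvPrefixB ((6 : Int) + 1) 0 + (183 - ((31 : Int) - bd)) - 1) 366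
        = PySem.Int.mod (PySem.List.pyGetD pvPrefixB (6 : Int) 0 + bd + 182) 366 := by
      rw [show PySem.List.pyGetD pvPrefixB ((6 : Int) + 1) 0 = (213 : Int) from by decide,
          show PySem.List.pyGetD pvPrefixB (6 : Int) 0 = (182 : Int) from by decide]
      congr 1
      ring
    rw [harg]
  · -- "august"
    rw [show (pvMonthDays.get? "august").getD 0 = (31 : Int) from by decide] at hd
    simp only [calculate_half_birthday, calculate_half_birthday_alt,
      show PySem.List.index? pvMonths "august" = some 7 from by decide,
      show PySem.List.index? pvMonthsB "august" = some 7 from by decide,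
      show (pvMonthDays.get? "august").getD 0 = (31 : Int) from by decide,
      Nat.cast_ofNat, Nat.cast_zero, Nat.cast_one]
    rw [loopA_eq _ (7 : Int) (183 - (31 - bd)) (by norm_num) (by norm_num) (by omega) (by omega)]
    have harg : PySem.Int.mod (PySem.List.pyGetD pvPrefixB ((7 : Int) + 1) 0 + (183 - ((31 : Int) - bd)) - 1) 366
        = PySem.Int.mod (PySem.List.pyGetD pvPrefixB (7 : Int) 0 + bd + 182) 366 := by
      rw [show PySem.List.pyGetD pvPrefixB ((7 : Int) + 1) 0 = (244 : Int) from by decide,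
          show PySem.List.pyGetD pvPrefixB (7 : Int) 0 = (213 : Int) from by decide]
      congr 1
      ring
    rw [harg]
  · -- "september"
    rw [show (pvMonthDays.get? "september").getD 0 = (30 : Int) from by decide] at hd
    simp only [calculate_half_birthday, calculate_half_birthday_alt,
      show PySem.List.index? pvMonths "september" = some 8 from by decide,
      show PySem.List.index? pvMonthsB "september" = some 8 from by decide,
      show (pvMonthDays.get? "september").getD 0 = (30 : Int) from by decide,
      Nat.cast_ofNat, Nat.cast_zero, Nat.cast_one]
    rw [loopA_eq _ (8 : Int) (183 - (30 - bd)) (by norm_num) (by norm_num) (by omega) (by omega)]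
    have harg : PySem.Int.mod (PySem.List.pyGetD pvPrefixB ((8 : Int) + 1) 0 + (183 - ((30 : Int) - bd)) - 1) 366
        = PySem.Int.mod (PySem.List.pyGetD pvPrefixB (8 : Int) 0 + bd + 182) 366 := by
      rw [show PySem.List.pyGetD pvPrefixB ((8 : Int) + 1) 0 = (274 : Int) from by decide,
          show PySem.List.pyGetD pvPrefixB (8 : Int) 0 = (244 : Int) from by decide]
      congr 1
      ring
    rw [harg]
  · -- "october"
    rw [show (pvMonthDays.get? "october").getD 0 = (31 : Int) from by decide] at hd
    simp only [calculate_half_birthday, calculate_half_birthday_alt,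
      show PySem.List.index? pvMonths "october" = some 9 from by decide,
      show PySem.List.index? pvMonthsB "october" = some 9 from by decide,
      show (pvMonthDays.get? "october").getD 0 = (31 : Int) from by decide,
      Nat.cast_ofNat, Nat.cast_zero, Nat.cast_one]
    rw [loopA_eq _ (9 : Int) (183 - (31 - bd)) (by norm_num) (by norm_num) (by omega) (by omega)]
    have harg : PySem.Int.mod (PySem.List.pyGetD pvPrefixB ((9 : Int) + 1) 0 + (183 - ((31 : Int) - bd)) - 1) 366
        = PySem.Int.mod (PySem.List.pyGetD pvPrefixB (9 : Int) 0 + bd + 182) 366 := by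
      rw [show PySem.List.pyGetD pvPrefixB ((9 : Int) + 1) 0 = (305 : Int) from by decide,
          show PySem.List.pyGetD pvPrefixB (9 : Int) 0 = (274 : Int) from by decide]
      congr 1
      ring
    rw [harg]
  · -- "november"
    rw [show (pvMonthDays.get? "november").getD 0 = (30 : Int) from by decide] at hd
    simp only [calculate_half_birthday, calculate_half_birthday_alt,
      show PySem.List.index? pvMonths "november" = some 10 from by decide,
      show PySem.List.index? pvMonthsB "november" = some 10 from by decide,
      show (pvMonthDays.get? "november").getD 0 = (30 : Int) from by decide,
      Nat.cast_ofNat, Nat.cast_zero, Nat.cast_one]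
    rw [loopA_eq _ (10 : Int) (183 - (30 - bd)) (by norm_num) (by norm_num) (by omega) (by omega)]
    have harg : PySem.Int.mod (PySem.List.pyGetD pvPrefixB ((10 : Int) + 1) 0 + (183 - ((30 : Int) - bd)) - 1) 366
        = PySem.Int.mod (PySem.List.pyGetD pvPrefixB (10 : Int) 0 + bd + 182) 366 := by
      rw [show PySem.List.pyGetD pvPrefixB ((10 : Int) + 1) 0 = (335 : Int) from by decide,
          show PySem.List.pyGetD pvPrefixB (10 : Int) 0 = (305 : Int) from by decide]
      congr 1
      ring
    rw [harg]
  · -- "december"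
    rw [show (pvMonthDays.get? "december").getD 0 = (31 : Int) from by decide] at hd
    simp only [calculate_half_birthday, calculate_half_birthday_alt,
      show PySem.List.index? pvMonths "december" = some 11 from by decide,
      show PySem.List.index? pvMonthsB "december" = some 11 from by decide,
      show (pvMonthDays.get? "december").getD 0 = (31 : Int) from by decide,
      Nat.cast_ofNat, Nat.cast_zero, Nat.cast_one]
    rw [loopA_eq _ (11 : Int) (183 - (31 - bd)) (by norm_num) (by norm_num) (by omega) (by omega)]
    have harg : PySem.Int.mod (PySem.List.pyGetD pvPrefixB ((11 : Int) + 1) 0 + (183 - ((31 : Int) - bd)) - 1) 366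
        = PySem.Int.mod (PySem.List.pyGetD pvPrefixB (11 : Int) 0 + bd + 182) 366 := by
      rw [show PySem.List.pyGetD pvPrefixB ((11 : Int) + 1) 0 = (366 : Int) from by decide,
          show PySem.List.pyGetD pvPrefixB (11 : Int) 0 = (335 : Int) from by decide]
      congr 1
      ring
    rw [harg]
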